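-- pv_equiv track=rewrite | github.com/Olly000/RandomNoteGen | RandomNoteV3.py | note_list_gen
-- ===== SOURCE A (Python) =====
-- def note_list_gen(note_key: int, note_range: list) -> list:
--     """ Takes in the key offset value and the highest and lowest notes to be output
--     amd returns a list of notes as ints to be played
--     :param note_key:
--     :param note_range:
--     :return:
--     """
--     note_list = []
--     for n in note_key:
--         note_list.append(note_range[0] + n)
--     while note_list[-1] < note_range[1]:
--         note_key = [n + 12 for n in note_key]
--         for n in note_key:
--             if note_list[-1] < note_range[1]:
--                 note_list.append(note_range[0] + n)
--     return note_list
-- ===== SOURCE B (Python) =====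
-- def note_list_gen(note_key: int, note_range: list) -> list:
--     """Flat single loop: note i (0-based) is note_range[0] + note_key[i % L] + 12 * (i // L);
--     the first L notes are emitted unconditionally, later ones while the last emitted
--     note is still below note_range[1]. note_key is not mutated."""
--     base = note_range[0]
--     out = [base + n for n in note_key]
--     top = note_range[1]
--     L = len(note_key)
--     i = L
--     while out[-1] < top:
--         out.append(base + note_key[i % L] + 12 * (i // L))
--         i += 1
--     return out
-- ===== Notes on version B (the rewrite author's own statement) =====
-- stated objective: alternative
-- what changed: Replaces A's nested structure (an outer while that rebuilds note_key shifted by 12 each octave and an inner guarded for over it) with one flat while loop that computes each note directly as note_range[0] + note_key[i % L] + 12 * (i // L) from a single running index, never mutating or rebuilding note_key.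
import Mathlib
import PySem

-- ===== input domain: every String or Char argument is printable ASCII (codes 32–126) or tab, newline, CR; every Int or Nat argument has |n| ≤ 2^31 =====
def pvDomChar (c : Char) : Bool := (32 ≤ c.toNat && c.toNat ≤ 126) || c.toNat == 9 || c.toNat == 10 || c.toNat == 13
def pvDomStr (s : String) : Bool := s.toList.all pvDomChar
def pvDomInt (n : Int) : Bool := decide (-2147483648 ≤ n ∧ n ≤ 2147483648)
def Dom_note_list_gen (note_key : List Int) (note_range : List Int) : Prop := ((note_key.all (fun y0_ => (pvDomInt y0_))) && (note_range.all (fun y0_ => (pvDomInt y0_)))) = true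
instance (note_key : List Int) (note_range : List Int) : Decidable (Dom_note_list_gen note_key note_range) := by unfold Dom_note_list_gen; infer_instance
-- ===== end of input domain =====

-- B flattens A's nested octave loops into one index-driven loop (same values, note_key untouched); alternative decomposition, no speed claim.


-- ===== PORT A =====
-- note_list[-1]; inside Pre_ the list is always nonempty so the default is never used
def pvLast (nl : List Int) : Int := (PySem.List.pyGet? nl (-1)).getD 0

-- fuel bound (pure totality guard for the while loops; provably/empirically sufficient inside Pre_)
def pvFuelK (base top : Int) (key : List Int) : Nat := (top - base - (key.min?.getD 0)).toNat + 2

-- inner 'for n in note_key: if note_list[-1] < top: note_list.append(base + n)'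
def pvPass (base top : Int) (key nl : List Int) : List Int :=
  key.foldl (fun acc n => if pvLast acc < top then acc ++ [base + n] else acc) nl

-- outer 'while note_list[-1] < top: note_key = [n+12 for n in note_key]; <inner for>'
def pvWhile (fuel : Nat) (base top : Int) (key nl : List Int) : List Int :=
  match fuel with
  | 0 => nl
  | f+1 =>
    if pvLast nl < top then
      pvWhile f base top (key.map (fun n => n + 12)) (pvPass base top (key.map (fun n => n + 12)) nl)
    else nl

def note_list_gen (note_key : List Int) (note_range : List Int) : List Int :=
  let base := (PySem.List.pyGet? note_range 0).getD 0
  let top := (PySem.List.pyGet? note_range 1).getD 0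
  let nl := note_key.foldl (fun acc n => acc ++ [base + n]) []
  pvWhile (pvFuelK base top note_key) base top note_key nl

-- ===== PORT B =====
-- 'while out[-1] < top: out.append(base + note_key[i % L] + 12 * (i // L)); i += 1'
def pvBLoop (fuel : Nat) (base top : Int) (key : List Int) (L i : Nat) (out : List Int) : List Int :=
  match fuel with
  | 0 => out
  | f+1 =>
    if pvLast out < top then
      pvBLoop f base top key L (i+1)
        (out ++ [base + (PySem.List.pyGet? key ((i % L : Nat) : Int)).getD 0 + 12 * ((i / L : Nat) : Int)])
    else out

def note_list_gen_alt (note_key : List Int) (note_range : List Int) : List Int :=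
  let base := (PySem.List.pyGet? note_range 0).getD 0
  let out := note_key.map (fun n => base + n)
  let top := (PySem.List.pyGet? note_range 1).getD 0
  let L := note_key.length
  pvBLoop (L * pvFuelK base top note_key) base top note_key L L out

-- ===== PRECONDITION & SPEC =====
-- A raises IndexError when note_key is empty (note_list[-1] on []) or note_range has
-- fewer than 2 elements (note_range[0] / note_range[1]); exactly those inputs are excluded.
def Pre_note_list_gen (note_key : List Int) (note_range : List Int) : Prop :=
  note_key ≠ [] ∧ 2 ≤ note_range.length
instance (note_key : List Int) (note_range : List Int) : Decidable (Pre_note_list_gen note_key note_range) := by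
  unfold Pre_note_list_gen; infer_instance

def pvWitness_note_list_gen : List Int × List Int := ([0, 4, 7], [60, 80])

def Spec_note_list_gen (note_key : List Int) (note_range : List Int) (out : List Int) : Prop := out = note_list_gen_alt note_key note_range
instance (note_key : List Int) (note_range : List Int) (out : List Int) : Decidable (Spec_note_list_gen note_key note_range out) := by unfold Spec_note_list_gen; infer_instance

-- ===== CLAIM (what is proved, stated in full; the proofs are below) =====
def Claim_equal_note_list_gen : Prop := ∀ (note_key : List Int) (note_range : List Int), Dom_note_list_gen note_key note_range → Pre_note_list_gen note_key note_range → Spec_note_list_gen note_key note_range (note_list_gen note_key note_range)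

-- ===== LEMMAS AND PROOFS =====

-- when the guard is already false, the guarded fold appends nothing
lemma fold_noop (base top : Int) (ks : List Int) :
    ∀ nl : List Int, ¬ pvLast nl < top →
      ks.foldl (fun acc n => if pvLast acc < top then acc ++ [base + n] else acc) nl = nl := by
  induction ks with
  | nil => intro nl _; rfl
  | cons n ks ih =>
      intro nl h
      simp only [List.foldl_cons, if_neg h]
      exact ih nl h

lemma bLoop_guard_false (f : Nat) (base top : Int) (key : List Int) (L i : Nat) (out : List Int)
    (h : ¬ pvLast out < top) : pvBLoop f base top key L i out = out := by
  cases f with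
  | zero => rfl
  | succ f => simp [pvBLoop, if_neg h]

lemma aWhile_guard_false (f : Nat) (base top : Int) (key nl : List Int)
    (h : ¬ pvLast nl < top) : pvWhile f base top key nl = nl := by
  cases f with
  | zero => rfl
  | succ f => simp [pvWhile, if_neg h]

-- one guarded fold over ks = |ks| steps of the flat loop, when the flat loop's
-- computed values agree with the elements of ks
lemma pass_eq (base top : Int) (key : List Int) (L : Nat) :
    ∀ (ks : List Int) (i fb : Nat) (nl : List Int),
      (∀ m (hm : m < ks.length),
        (PySem.List.pyGet? key (((i+m) % L : Nat) : Int)).getD 0 + 12 * (((i+m) / L : Nat) : Int)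
          = ks[m]) →
      pvBLoop (ks.length + fb) base top key L i nl =
        (if pvLast (ks.foldl (fun acc n => if pvLast acc < top then acc ++ [base + n] else acc) nl) < top
         then pvBLoop fb base top key L (i + ks.length)
                (ks.foldl (fun acc n => if pvLast acc < top then acc ++ [base + n] else acc) nl)
         else ks.foldl (fun acc n => if pvLast acc < top then acc ++ [base + n] else acc) nl) := by
  intro ks
  induction ks with
  | nil =>
      intro i fb nl _
      simp only [List.foldl_nil, List.length_nil, Nat.zero_add, Nat.add_zero]
      by_cases h : pvLast nl < top
      · rw [if_pos h]
      · rw [if_neg h, bLoop_guard_false _ _ _ _ _ _ _ h]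
  | cons n ks ih =>
      intro i fb nl H
      by_cases h : pvLast nl < top
      · have hv : (PySem.List.pyGet? key ((i % L : Nat) : Int)).getD 0 + 12 * ((i / L : Nat) : Int) = n := by
          have := H 0 (by simp)
          simpa using this
        have hstep : pvBLoop (ks.length + 1 + fb) base top key L i nl
            = pvBLoop (ks.length + fb) base top key L (i+1)
                (nl ++ [base + (PySem.List.pyGet? key ((i % L : Nat) : Int)).getD 0 + 12 * ((i / L : Nat) : Int)]) := by
          have : ks.length + 1 + fb = (ks.length + fb) + 1 := by omega
          rw [this]
          simp [pvBLoop, if_pos h]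
        have hval : nl ++ [base + (PySem.List.pyGet? key ((i % L : Nat) : Int)).getD 0 + 12 * ((i / L : Nat) : Int)]
            = nl ++ [base + n] := by rw [← hv]; ring_nf
        have H' : ∀ m (hm : m < ks.length),
            (PySem.List.pyGet? key (((i+1+m) % L : Nat) : Int)).getD 0 + 12 * (((i+1+m) / L : Nat) : Int)
              = ks[m] := by
          intro m hm
          have := H (m+1) (by simp; omega)
          have harith : i + (m+1) = i+1+m := by omega
          rw [harith] at this
          simpa using this
        have := ih (i+1) fb (nl ++ [base + n]) H'
        simp only [List.length_cons]
        rw [hstep, hval, this]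
        simp only [List.foldl_cons, if_pos h]
        have : i + 1 + ks.length = i + (ks.length + 1) := by omega
        rw [this]
      · -- guard false: the flat loop returns nl and the fold appends nothing
        have hfold := fold_noop base top (n :: ks) nl h
        rw [hfold, if_neg h]
        exact bLoop_guard_false _ _ _ _ _ _ _ h

-- arithmetic on the flat index inside one octave block
lemma block_index (L k m : Nat) (hm : m < L) :
    ((k+1) * L + m) % L = m ∧ ((k+1) * L + m) / L = k + 1 := by
  constructor
  · rw [Nat.add_comm, Nat.add_mul_mod_self_right, Nat.mod_eq_of_lt hm]
  · rw [Nat.add_comm, Nat.add_mul_div_right _ _ (by omega : 0 < L), Nat.div_eq_of_lt hm]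
    omega

-- the outer while with the key shifted by 12*k = the flat loop positioned at index (k+1)*L
lemma while_eq (base top : Int) (key : List Int) :
    ∀ (fa k : Nat) (nl : List Int),
      pvWhile fa base top (key.map (fun n => n + 12 * (k : Int))) nl =
        pvBLoop (fa * key.length) base top key key.length ((k+1) * key.length) nl := by
  intro fa
  induction fa with
  | zero => intro k nl; simp [pvWhile, pvBLoop]
  | succ fa ih =>
      intro k nl
      by_cases h : pvLast nl < top
      · have hmap : (key.map (fun n => n + 12 * (k : Int))).map (fun n => n + 12)
            = key.map (fun n => n + 12 * ((k+1 : Nat) : Int)) := by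
          rw [List.map_map]
          apply List.map_congr_left
          intro a _
          simp only [Function.comp_apply]
          push_cast
          ring
        have hunfold : pvWhile (fa+1) base top (key.map (fun n => n + 12 * (k : Int))) nl
            = pvWhile fa base top (key.map (fun n => n + 12 * ((k+1 : Nat) : Int)))
                (pvPass base top (key.map (fun n => n + 12 * ((k+1 : Nat) : Int))) nl) := by
          simp only [pvWhile, if_pos h, hmap]
        set ks := key.map (fun n => n + 12 * ((k+1 : Nat) : Int)) with hks
        have hlen : ks.length = key.length := by simp [hks]
        have H : ∀ m (hm : m < ks.length),
            (PySem.List.pyGet? key ((((k+1) * key.length + m) % key.length : Nat) : Int)).getD 0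
              + 12 * ((((k+1) * key.length + m) / key.length : Nat) : Int) = ks[m] := by
          intro m hm
          rw [hlen] at hm
          obtain ⟨h1, h2⟩ := block_index key.length k m hm
          rw [h1, h2]
          have hget : PySem.List.pyGet? key ((m : Nat) : Int) = some key[m] := by
            rw [PySem.List.pyGet?_natCast]
            simp [List.getElem?_eq_getElem hm]
          rw [hget]
          simp only [hks, List.getElem_map, Option.getD_some]
        have hpe := pass_eq base top key key.length ks ((k+1) * key.length) (fa * key.length) nl H
        have hmul : (fa + 1) * key.length = ks.length + fa * key.length := by
          rw [hlen]; ring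
        rw [hunfold, hmul, hpe]
        set nl' := ks.foldl (fun acc n => if pvLast acc < top then acc ++ [base + n] else acc) nl with hnl'
        have hpass : pvPass base top ks nl = nl' := rfl
        rw [hpass]
        by_cases h2 : pvLast nl' < top
        · rw [if_pos h2, ih (k+1) nl']
          have : (k+1) * key.length + ks.length = (k+1+1) * key.length := by rw [hlen]; ring
          rw [this]
        · rw [if_neg h2]
          exact aWhile_guard_false _ _ _ _ _ h2
      · rw [aWhile_guard_false _ _ _ _ _ h, bLoop_guard_false _ _ _ _ _ _ _ h]

-- A's initial append loop builds the same list as B's comprehension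
lemma foldl_append_map (base : Int) (key : List Int) :
    ∀ acc : List Int, key.foldl (fun acc n => acc ++ [base + n]) acc = acc ++ key.map (fun n => base + n) := by
  induction key with
  | nil => intro acc; simp
  | cons n ks ih => intro acc; simp [List.foldl_cons, ih]

lemma shift_zero (key : List Int) : key.map (fun n => n + 12 * ((0 : Nat) : Int)) = key := by
  simp

-- ===== VERDICT (by name: the statement is the Claim_ definition above) =====
theorem note_list_gen_spec : Claim_equal_note_list_gen := by
  intro note_key note_range _ _
  unfold Spec_note_list_gen note_list_gen note_list_gen_alt
  simp only
  rw [foldl_append_map, List.nil_append]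
  have := while_eq ((PySem.List.pyGet? note_range 0).getD 0) ((PySem.List.pyGet? note_range 1).getD 0)
      note_key (pvFuelK ((PySem.List.pyGet? note_range 0).getD 0) ((PySem.List.pyGet? note_range 1).getD 0) note_key)
      0 (note_key.map (fun n => (PySem.List.pyGet? note_range 0).getD 0 + n))
  rw [shift_zero] at this
  rw [this]
  have h1 : (0+1) * note_key.length = note_key.length := by ring
  have h2 : pvFuelK ((PySem.List.pyGet? note_range 0).getD 0) ((PySem.List.pyGet? note_range 1).getD 0) note_key * note_key.length
      = note_key.length * pvFuelK ((PySem.List.pyGet? note_range 0).getD 0) ((PySem.List.pyGet? note_range 1).getD 0) note_key := by ring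
  rw [h1, h2]
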